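-- pv_equiv track=rewrite | github.com/Juan1T0x/tfg | moba_analysis_app/backend/services/live_game_analysis/champion_select/champion_matcher.py | subdivide_roi
-- ===== SOURCE A (Python) =====
-- from typing import Dict, List, Tuple
--
-- def subdivide_roi(box: Tuple[int, int, int, int], n: int = 5) -> List[Tuple[int, int, int, int]]:
--     """Split a horizontal champion row into *n* equal rectangles."""
--     x1, y1, x2, y2 = box
--     step = (x2 - x1) // n
--     return [
--         (x1 + i * step, y1,
--          x1 + (i + 1) * step if i < n - 1 else x2, y2)
--         for i in range(n)
--     ]
-- ===== SOURCE B (Python) =====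
-- def _strips(x1, y1, x2, y2, step, n):
--     """Yield the n strips left to right, carrying the running left edge;
--     the closing strip's right edge is the box edge x2 itself."""
--     cur = x1
--     for _ in range(n - 1):
--         nxt = cur + step
--         yield (cur, y1, nxt, y2)
--         cur = nxt
--     if n > 0:
--         yield (cur, y1, x2, y2)
--
--
-- def subdivide_roi(box, n=5):
--     """Split a horizontal champion row into *n* equal rectangles.
--
--     Streaming decomposition: a generator walks a running left edge (each
--     strip starts where the previous ended, no index*step arithmetic) and
--     list() consumes it.
--     """
--     x1, y1, x2, y2 = box
--     step = (x2 - x1) // n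
--     return list(_strips(x1, y1, x2, y2, step, n))
-- ===== Notes on version B (the rewrite author's own statement) =====
-- stated objective: alternative
-- what changed: Replaces A's index-formula comprehension (x1+i*step with an inline last-index conditional) by a streaming generator that carries a running left edge (each strip starts where the previous one ended, no index multiplications) and yields the closing strip, with right edge x2, after the loop; list() consumes the stream.
import Mathlib
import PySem

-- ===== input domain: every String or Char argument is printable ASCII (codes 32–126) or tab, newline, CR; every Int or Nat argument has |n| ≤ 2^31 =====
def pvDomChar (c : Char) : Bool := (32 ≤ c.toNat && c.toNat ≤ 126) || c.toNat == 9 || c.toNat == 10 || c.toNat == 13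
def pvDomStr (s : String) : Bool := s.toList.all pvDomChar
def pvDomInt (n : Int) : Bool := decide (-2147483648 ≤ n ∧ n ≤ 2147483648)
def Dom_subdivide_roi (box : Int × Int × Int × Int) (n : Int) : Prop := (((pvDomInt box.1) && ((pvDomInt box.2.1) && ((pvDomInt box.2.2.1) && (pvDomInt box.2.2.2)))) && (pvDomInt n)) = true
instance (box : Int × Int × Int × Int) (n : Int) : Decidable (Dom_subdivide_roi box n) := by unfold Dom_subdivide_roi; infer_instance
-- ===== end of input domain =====

-- ===== PORT A =====
-- B replaces A's index-formula comprehension by a streaming generator carrying a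
-- running left edge, with the closing strip yielded after the loop; return values
-- proved equal for all n != 0 (Pre_ excludes n = 0, where A raises ZeroDivisionError).
def subdivide_roi (box : Int × Int × Int × Int) (n : Int) : List (Int × Int × Int × Int) :=
  let x1 := box.1
  let y1 := box.2.1
  let x2 := box.2.2.1
  let y2 := box.2.2.2
  let step := PySem.Int.floordiv (x2 - x1) n
  (PySem.List.pyRange 0 n 1).map (fun i =>
    (x1 + i * step, y1, if i < n - 1 then x1 + (i + 1) * step else x2, y2))

-- ===== PORT B =====
-- the generator _strips: 'k' is the number of loop iterations still to run
-- (range(n-1) has (n-1).toNat of them), 'cur' the running left edge; after the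
-- loop, one closing strip if n > 0.
def pvStrips (y1 x2 y2 step n : Int) : Nat → Int → List (Int × Int × Int × Int)
  | 0, cur => if n > 0 then [(cur, y1, x2, y2)] else []
  | k + 1, cur => (cur, y1, cur + step, y2) :: pvStrips y1 x2 y2 step n k (cur + step)

def subdivide_roi_alt (box : Int × Int × Int × Int) (n : Int) : List (Int × Int × Int × Int) :=
  let x1 := box.1
  let y1 := box.2.1
  let x2 := box.2.2.1
  let y2 := box.2.2.2
  let step := PySem.Int.floordiv (x2 - x1) n
  pvStrips y1 x2 y2 step n (n - 1).toNat x1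

-- ===== PRECONDITION & SPEC =====
-- Pre_ excludes exactly n = 0, where A (and B) raise ZeroDivisionError in '//'.
def Pre_subdivide_roi (box : Int × Int × Int × Int) (n : Int) : Prop := n ≠ 0
instance (box : Int × Int × Int × Int) (n : Int) : Decidable (Pre_subdivide_roi box n) := by unfold Pre_subdivide_roi; infer_instance
def pvWitness_subdivide_roi : (Int × Int × Int × Int) × Int := ((0, 0, 10, 4), 5)
def Spec_subdivide_roi (box : Int × Int × Int × Int) (n : Int) (out : List (Int × Int × Int × Int)) : Prop := out = subdivide_roi_alt box n
instance (box : Int × Int × Int × Int) (n : Int) (out : List (Int × Int × Int × Int)) : Decidable (Spec_subdivide_roi box n out) := by unfold Spec_subdivide_roi; infer_instance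

-- ===== CLAIM =====
def Claim_equal_subdivide_roi : Prop := ∀ (box : Int × Int × Int × Int) (n : Int), Dom_subdivide_roi box n → Pre_subdivide_roi box n → Spec_subdivide_roi box n (subdivide_roi box n)

-- ===== LEMMAS AND PROOFS =====

-- Generator invariant: with k iterations left and running edge cur = x1 + a*step,
-- the stream equals A's rectangles for the remaining indices [a, n).
lemma pvStrips_eq_map (x1 y1 x2 y2 step n : Int) :
    ∀ (k : Nat) (a : Int), (n - 1 - a).toNat = k → a ≤ n - 1 → 0 < n →
      pvStrips y1 x2 y2 step n k (x1 + a * step)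
      = (PySem.List.pyRange a n 1).map (fun i =>
          (x1 + i * step, y1, if i < n - 1 then x1 + (i + 1) * step else x2, y2)) := by
  intro k
  induction k with
  | zero =>
    intro a hk ha hn
    have ha' : a = n - 1 := by omega
    subst ha'
    rw [show PySem.List.pyRange (n - 1) n 1 = [n - 1] by
      have := PySem.List.pyRange_one_singleton (n - 1)
      simpa using this]
    simp [pvStrips, hn]
  | succ k ih =>
    intro a hk ha hn
    have hlt : a < n - 1 := by omega
    rw [PySem.List.pyRange_one_cons (by omega : a < n)]
    simp only [pvStrips, List.map_cons]
    have h1 : x1 + a * step + step = x1 + (a + 1) * step := by ring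
    rw [h1, ih (a + 1) (by omega) (by omega) hn]
    rw [if_pos hlt]

-- ===== VERDICT =====
theorem subdivide_roi_spec : Claim_equal_subdivide_roi := by
  intro box n _ hn
  unfold Spec_subdivide_roi subdivide_roi subdivide_roi_alt
  simp only []
  by_cases hpos : 0 < n
  · have h := pvStrips_eq_map box.1 box.2.1 box.2.2.1 box.2.2.2
      (PySem.Int.floordiv (box.2.2.1 - box.1) n) n (n - 1).toNat 0 (by omega) (by omega) hpos
    rw [show box.1 + 0 * PySem.Int.floordiv (box.2.2.1 - box.1) n = box.1 by ring] at h
    exact h.symm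
  · rw [PySem.List.pyRange_one_eq_nil (by omega)]
    have hk : (n - 1).toNat = 0 := by omega
    rw [hk]
    have : ¬ 0 < n := hpos
    simp [pvStrips, this]
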